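-- pv_equiv track=rewrite | github.com/Delafu7/EjerciciosLogicos-Python | Nivel Medio/TriplesPitagoricos.py | triplesPitagoricos
-- ===== SOURCE A (Python) =====
-- def triplesPitagoricos(n:int)->list:
--     if isinstance(n,int):
--         triples=[]
--         for a in range(1,n+1):
--             for b in range(a,n+1):
--                 for c in range(b,n+1):
--                     if a**2+b**2==c**2:
--                         triples.append((a,b,c))
--         return triples
--     else:
--         return []
-- ===== SOURCE B (Python) =====
-- def triplesPitagoricos(n: int) -> list:
--     if not isinstance(n, int):
--         return []
--     triples = []
--     for a in range(1, n + 1):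
--         c = a
--         for b in range(a, n + 1):
--             s = a * a + b * b
--             while c <= n and c * c < s:
--                 c += 1
--             if c <= n and c * c == s:
--                 triples.append((a, b, c))
--     return triples
-- ===== Notes on version B (the rewrite author's own statement) =====
-- stated objective: faster
-- what changed: Replaced the innermost brute-force scan over c by a two-pointer sweep: for each a, a single monotone pointer c advances across all b, since a*a+b*b is increasing in b.
import Mathlib
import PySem

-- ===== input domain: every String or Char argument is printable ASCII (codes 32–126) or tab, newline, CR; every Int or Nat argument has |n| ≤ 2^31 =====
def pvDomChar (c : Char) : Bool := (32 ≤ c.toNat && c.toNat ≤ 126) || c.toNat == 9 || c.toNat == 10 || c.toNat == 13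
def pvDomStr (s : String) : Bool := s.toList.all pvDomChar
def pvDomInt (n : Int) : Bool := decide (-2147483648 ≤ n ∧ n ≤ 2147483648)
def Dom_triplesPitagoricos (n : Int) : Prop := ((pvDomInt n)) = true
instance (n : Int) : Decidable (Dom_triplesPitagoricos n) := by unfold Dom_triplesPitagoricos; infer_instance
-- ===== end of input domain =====

-- B replaces the innermost brute-force c-scan by a monotone two-pointer sweep (O(n^2) instead of O(n^3)).

-- ===== PORT A =====
-- literal port of A's triple nested loop (the isinstance(n,int) test is always true for an Int)
def triplesPitagoricos (n : Int) : List (Int × Int × Int) :=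
  (PySem.List.pyRange 1 (n+1) 1).foldl (fun tr a =>
    (PySem.List.pyRange a (n+1) 1).foldl (fun tr b =>
      (PySem.List.pyRange b (n+1) 1).foldl (fun tr c =>
        if a^2 + b^2 == c^2 then tr ++ [(a,b,c)] else tr) tr) tr) []

-- ===== PORT B =====
-- the 'while c <= n and c*c < s: c += 1' loop of Source B
def pvAdvance (n s c : Int) : Int :=
  if h : c ≤ n ∧ c * c < s then pvAdvance n s (c + 1) else c
termination_by (n + 1 - c).toNat
decreasing_by omega

def triplesPitagoricos_alt (n : Int) : List (Int × Int × Int) :=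
  (PySem.List.pyRange 1 (n+1) 1).foldl (fun tr a =>
    ((PySem.List.pyRange a (n+1) 1).foldl
      (fun (st : List (Int × Int × Int) × Int) b =>
        let s := a * a + b * b
        let c := pvAdvance n s st.2
        (if c ≤ n ∧ c * c == s then st.1 ++ [(a,b,c)] else st.1, c))
      (tr, a)).1) []

-- ===== PRECONDITION & SPEC =====
def Spec_triplesPitagoricos (n : Int) (out : List (Int × Int × Int)) : Prop := out = triplesPitagoricos_alt n
instance (n : Int) (out : List (Int × Int × Int)) : Decidable (Spec_triplesPitagoricos n out) := by unfold Spec_triplesPitagoricos; infer_instance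

-- ===== CLAIM (what is proved, stated in full; the proofs are below) =====
def Claim_equal_triplesPitagoricos : Prop := ∀ (n : Int), Dom_triplesPitagoricos n → Spec_triplesPitagoricos n (triplesPitagoricos n)

-- ===== LEMMAS AND PROOFS =====

-- pvAdvance only moves forward
theorem pvAdvance_ge (n s c : Int) : c ≤ pvAdvance n s c := by
  unfold pvAdvance
  split
  · have := pvAdvance_ge n s (c + 1); omega
  · omega
termination_by (n + 1 - c).toNat
decreasing_by omega

-- everything strictly between the start and the stop point squares below s
theorem pvAdvance_below (n s c : Int) (x : Int) (h1 : c ≤ x) (h2 : x < pvAdvance n s c) :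
    x * x < s := by
  unfold pvAdvance at h2
  split at h2
  · rcases eq_or_lt_of_le h1 with rfl | h1'
    · rename_i h; rcases h with ⟨_, hlt⟩
      exact hlt
    · exact pvAdvance_below n s (c + 1) x (by omega) h2
  · omega
termination_by (n + 1 - c).toNat
decreasing_by omega

-- at the stop point the while-condition fails
theorem pvAdvance_stop (n s c : Int) :
    ¬ (pvAdvance n s c ≤ n ∧ pvAdvance n s c * pvAdvance n s c < s) := by
  unfold pvAdvance
  split
  · exact pvAdvance_stop n s (c + 1)
  · assumption
termination_by (n + 1 - c).toNat
decreasing_by omega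

-- the unique-candidate characterisation of A's innermost filter
theorem filter_sq_eq (a b n c1 : Int) (ha : 1 ≤ a) (hb : b ≤ c1)
    (hlow : ∀ x, b ≤ x → x < c1 → x * x < a * a + b * b)
    (hstop : ¬ (c1 ≤ n ∧ c1 * c1 < a * a + b * b)) :
    (PySem.List.pyRange b (n+1) 1).filter (fun c => a^2 + b^2 == c^2) =
      if c1 ≤ n ∧ c1 * c1 = a * a + b * b then [c1] else [] := by
  have hs : ∀ x : Int, (a^2 + b^2 == x^2) = (a * a + b * b == x * x) := by
    intro x; have h1 : a^2 = a*a := sq a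
    have h2 : b^2 = b*b := sq b
    have h3 : x^2 = x*x := sq x
    rw [h1, h2, h3]
  by_cases hc : c1 ≤ n ∧ c1 * c1 = a * a + b * b
  · -- split the range at c1 and at c1+1
    rw [if_pos hc]
    have hsplit : PySem.List.pyRange b (n+1) 1 =
        PySem.List.pyRange b c1 1 ++ PySem.List.pyRange c1 (n+1) 1 :=
      PySem.List.pyRange_one_append b c1 (n+1) hb (by omega)
    have hcons : PySem.List.pyRange c1 (n+1) 1 = c1 :: PySem.List.pyRange (c1+1) (n+1) 1 :=
      PySem.List.pyRange_one_cons (by omega)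
    rw [hsplit, List.filter_append, hcons]
    have hnil1 : (PySem.List.pyRange b c1 1).filter (fun c => a^2 + b^2 == c^2) = [] := by
      rw [List.filter_eq_nil_iff]
      intro x hx
      rw [PySem.List.mem_pyRange_one] at hx
      have := hlow x hx.1 hx.2
      rw [hs]; simp only [beq_iff_eq]; omega
    have hnil2 : (PySem.List.pyRange (c1+1) (n+1) 1).filter (fun c => a^2 + b^2 == c^2) = [] := by
      rw [List.filter_eq_nil_iff]
      intro x hx
      rw [PySem.List.mem_pyRange_one] at hx
      have hx1 : c1 < x := by omega
      have hpos : 0 < c1 := by nlinarith [hc.2]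
      have : c1 * c1 < x * x := by nlinarith
      rw [hs]; simp only [beq_iff_eq]; omega
    rw [hnil1, List.filter_cons]
    have : (a^2 + b^2 == c1^2) = true := by rw [hs]; simp only [beq_iff_eq]; omega
    rw [this, hnil2]
    simp
  · rw [if_neg hc, List.filter_eq_nil_iff]
    intro x hx
    rw [PySem.List.mem_pyRange_one] at hx
    rw [hs]; simp only [beq_iff_eq]
    rcases lt_trichotomy x c1 with h | rfl | h
    · have := hlow x hx.1 h; omega
    · omega
    · have hxn : x ≤ n := by omega
      have hc1n : c1 ≤ n := by omega
      have hge : ¬ c1 * c1 < a * a + b * b := by tauto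
      have hbpos : 0 < a * a + b * b := by nlinarith
      have hpos : 0 ≤ c1 := by nlinarith
      have : c1 * c1 < x * x := by nlinarith
      omega

-- the inner b-loop of B computes the same list as the inner (b,c) double loop of A
theorem inner_eq (n a : Int) (ha : 1 ≤ a) :
    ∀ b0 c0 (tr : List (Int × Int × Int)), a ≤ b0 → b0 ≤ c0 →
    (∀ x, b0 ≤ x → x < c0 → x * x < a * a + b0 * b0) →
    ((PySem.List.pyRange b0 (n+1) 1).foldl
      (fun (st : List (Int × Int × Int) × Int) b =>
        let s := a * a + b * b
        let c := pvAdvance n s st.2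
        (if c ≤ n ∧ c * c == s then st.1 ++ [(a,b,c)] else st.1, c))
      (tr, c0)).1 =
    (PySem.List.pyRange b0 (n+1) 1).foldl (fun tr b =>
      (PySem.List.pyRange b (n+1) 1).foldl (fun tr c =>
        if a^2 + b^2 == c^2 then tr ++ [(a,b,c)] else tr) tr) tr := by
  intro b0 c0 tr hab hbc hinv
  by_cases hend : n + 1 ≤ b0
  · rw [PySem.List.pyRange_one_eq_nil hend]; rfl
  · have hcons : PySem.List.pyRange b0 (n+1) 1 = b0 :: PySem.List.pyRange (b0+1) (n+1) 1 :=
      PySem.List.pyRange_one_cons (by omega)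
    rw [hcons]
    simp only [List.foldl_cons]
    set s := a * a + b0 * b0 with hs
    set c1 := pvAdvance n s c0 with hc1
    have hc0c1 : c0 ≤ c1 := pvAdvance_ge n s c0
    have hstop := pvAdvance_stop n s c0
    have hlow : ∀ x, b0 ≤ x → x < c1 → x * x < s := by
      intro x hx1 hx2
      rcases lt_or_ge x c0 with h | h
      · exact hinv x hx1 h
      · exact pvAdvance_below n s c0 x h hx2
    -- A's innermost loop for b = b0, rewritten as a filter
    have hA := PySem.List.foldl_append_if (l := PySem.List.pyRange b0 (n+1) 1)
      (p := fun c => a^2 + b0^2 == c^2) (f := fun c => (a, b0, c)) (acc := tr)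
    rw [hA, filter_sq_eq a b0 n c1 ha (by omega) hlow hstop]
    -- both branches append the same (possibly empty) singleton
    have hbranch : (if c1 ≤ n ∧ c1 * c1 == s then tr ++ [(a,b0,c1)] else tr) =
        tr ++ (if c1 ≤ n ∧ c1 * c1 = s then [c1] else []).map (fun c => (a, b0, c)) := by
      by_cases h : c1 ≤ n ∧ c1 * c1 = s
      · rw [if_pos h, if_pos (by simpa using h)]; simp
      · rw [if_neg h, if_neg (by simpa using h)]; simp
    -- invariant for the next b
    have hnext : ∀ x, b0 + 1 ≤ x → x < c1 → x * x < a * a + (b0+1) * (b0+1) := by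
      intro x hx1 hx2
      have := hlow x (by omega) hx2
      nlinarith
    have hbc1 : b0 + 1 ≤ c1 := by
      by_cases h : c1 ≤ n
      · have hge : ¬ c1 * c1 < s := by tauto
        have hbpos : 0 < s := by nlinarith
        have hc1pos : 0 ≤ c1 := by nlinarith
        nlinarith
      · omega
    have hIH := inner_eq n a ha (b0 + 1) c1
      (tr ++ (if c1 ≤ n ∧ c1 * c1 = s then [c1] else []).map (fun c => (a, b0, c)))
      (by omega) hbc1 hnext
    simp only [← hs]
    rw [hbranch]
    exact hIH
termination_by b0 => (n + 1 - b0).toNat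
decreasing_by omega

-- ===== VERDICT (by name: the statement is the Claim_ definition above) =====
theorem triplesPitagoricos_spec : Claim_equal_triplesPitagoricos := by
  intro n _
  unfold Spec_triplesPitagoricos triplesPitagoricos triplesPitagoricos_alt
  refine Eq.symm ?_
  apply PySem.List.foldl_congr_mem
  intro tr a hmem
  rw [PySem.List.mem_pyRange_one] at hmem
  exact inner_eq n a hmem.1 a a tr le_rfl le_rfl (by omega)
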